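-- pv_equiv track=rewrite | github.com/LivInTheLookingGlass/Thue-Morse | code/p2/d12.py | gould
-- ===== SOURCE A (Python) =====
-- def gould(n: int) -> int:
--     binomial_coeff = 1
--     partial_sum = 0
--     for k in range((n + 1) // 2):
--         # Add the current term to the total sum
--         partial_sum += binomial_coeff % 2
--         # C(n, k) = C(n, k-1) * (n - (k - 1)) / k
--         binomial_coeff = binomial_coeff * (n - k) // (k + 1)
--     partial_sum *= 2
--     if n % 2 == 0:
--         partial_sum += binomial_coeff % 2
--     return partial_sum
-- ===== SOURCE B (Python) =====
-- def gould(n: int) -> int: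
--     # Gould's sequence: the number of odd entries in row n of Pascal's
--     # triangle is 2**popcount(n).  O(log n) instead of O(n) bigint loop.
--     if n < 0:
--         raise ValueError("gould is defined for n >= 0")
--     count = 0
--     m = n
--     while m:
--         count += m & 1
--         m >>= 1
--     return 1 << count
-- ===== Notes on version B (the rewrite author's own statement) =====
-- stated objective: faster
-- what changed: Replaces the half-row loop that computes each binomial coefficient with Gould's closed form 2**popcount(n), iterating over the bits of n instead of over n/2 bigint multiplications/divisions.
-- outside the precondition, e.g. on gould(-2): A returns 1, B raises ValueError; on gould(-3): A returns 0, B raises ValueError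
import Mathlib
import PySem

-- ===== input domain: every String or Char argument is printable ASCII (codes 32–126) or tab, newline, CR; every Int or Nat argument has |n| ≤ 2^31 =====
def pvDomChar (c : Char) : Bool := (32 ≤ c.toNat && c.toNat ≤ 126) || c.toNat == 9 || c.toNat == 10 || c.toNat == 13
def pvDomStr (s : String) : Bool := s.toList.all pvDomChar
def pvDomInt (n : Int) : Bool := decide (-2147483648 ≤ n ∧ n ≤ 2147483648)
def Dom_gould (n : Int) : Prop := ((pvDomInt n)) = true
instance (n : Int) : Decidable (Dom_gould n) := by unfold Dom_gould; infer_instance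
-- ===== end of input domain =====

-- B replaces A's half-row binomial loop by Gould's closed form 2^popcount(n) (faster, O(log n)).

-- ===== PORT A =====
def gould (n : Int) : Int :=
  let st := (PySem.List.pyRange 0 (PySem.Int.floordiv (n + 1) 2) 1).foldl
    (fun (st : Int × Int) k =>
      (PySem.Int.floordiv (st.1 * (n - k)) (k + 1), st.2 + PySem.Int.mod st.1 2))
    (1, 0)
  let ps := st.2 * 2
  if PySem.Int.mod n 2 = 0 then ps + PySem.Int.mod st.1 2 else ps

-- ===== PORT B =====
-- the 'while m: count += m & 1; m >>= 1' popcount loop of Source B (m & 1 = m % 2, m >> 1 = m / 2)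
def pcLoop (m count : Nat) : Nat :=
  if m = 0 then count else pcLoop (m / 2) (count + m % 2)
decreasing_by exact Nat.div_lt_self (Nat.pos_of_ne_zero (by assumption)) (by omega)

def gould_alt (n : Int) : Int :=
  if n < 0 then 0  -- the Python B raises ValueError here (outside Pre_gould)
  else (2 : Int) ^ (pcLoop n.toNat 0)  -- 1 << count

-- ===== PRECONDITION & SPEC =====
-- Pre_ excludes negative n, on which A's loop body never runs and A returns leftover initial
-- state (1 for even n, 0 for odd n); the natural B raises ValueError there.
def Pre_gould (n : Int) : Prop := 0 ≤ n
instance (n : Int) : Decidable (Pre_gould n) := by unfold Pre_gould; infer_instance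
def pvWitness_gould : Int := (6)
def Spec_gould (n : Int) (out : Int) : Prop := out = gould_alt n
instance (n : Int) (out : Int) : Decidable (Spec_gould n out) := by unfold Spec_gould; infer_instance

-- ===== CLAIM (what is proved, stated in full; the proofs are below) =====
def Claim_equal_gould : Prop := ∀ (n : Int), Dom_gould n → Pre_gould n → Spec_gould n (gould n)

-- ===== LEMMAS AND PROOFS =====

-- parity of C(n,k)
def gpar (n k : Nat) : Nat := Nat.choose n k % 2

-- number of odd entries in row n of Pascal's triangle
def oddRow (n : Nat) : Nat := ∑ k ∈ Finset.range (n + 1), gpar n k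

lemma pcLoop_shift (m c : Nat) : pcLoop m c = pcLoop m 0 + c := by
  induction m using Nat.strong_induction_on generalizing c with
  | _ m ih =>
    by_cases h : m = 0
    · simp [pcLoop, h]
    · have hlt : m / 2 < m := Nat.div_lt_self (Nat.pos_of_ne_zero h) (by omega)
      conv_lhs => rw [pcLoop]
      conv_rhs => rw [pcLoop]
      rw [if_neg h, if_neg h, ih _ hlt (c + m % 2), ih _ hlt (0 + m % 2)]
      omega

-- Lucas' theorem mod 2
lemma gpar_lucas (n k : Nat) :
    gpar n k = (Nat.choose (n % 2) (k % 2) * Nat.choose (n / 2) (k / 2)) % 2 := by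
  haveI : Fact (Nat.Prime 2) := ⟨by norm_num⟩
  exact Choose.choose_modEq_choose_mod_mul_choose_div_nat (p := 2)

lemma gpar_ee (m j : Nat) : gpar (2 * m) (2 * j) = gpar m j := by
  rw [gpar_lucas]
  simp [Nat.mul_mod_right, gpar]

lemma gpar_eo (m j : Nat) : gpar (2 * m) (2 * j + 1) = 0 := by
  rw [gpar_lucas]
  have h1 : (2 * j + 1) % 2 = 1 := by omega
  simp [h1, Nat.mul_mod_right]

lemma gpar_oe (m j : Nat) : gpar (2 * m + 1) (2 * j) = gpar m j := by
  rw [gpar_lucas]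
  have h1 : (2 * m + 1) % 2 = 1 := by omega
  have h2 : (2 * m + 1) / 2 = m := by omega
  have h4 : (2 * j) / 2 = j := by omega
  simp [h1, h2, h4, Nat.mul_mod_right, gpar]

lemma gpar_oo (m j : Nat) : gpar (2 * m + 1) (2 * j + 1) = gpar m j := by
  rw [gpar_lucas]
  have h1 : (2 * m + 1) % 2 = 1 := by omega
  have h2 : (2 * m + 1) / 2 = m := by omega
  have h3 : (2 * j + 1) % 2 = 1 := by omega
  have h4 : (2 * j + 1) / 2 = j := by omega
  simp [h1, h2, h3, h4, gpar]

lemma sum_range_two_mul {M : Type} [AddCommMonoid M] (f : Nat → M) (m : Nat) :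
    ∑ k ∈ Finset.range (2 * m), f k = ∑ j ∈ Finset.range m, (f (2 * j) + f (2 * j + 1)) := by
  induction m with
  | zero => simp
  | succ m ih =>
    have h : 2 * (m + 1) = 2 * m + 1 + 1 := by omega
    rw [h, Finset.sum_range_succ, Finset.sum_range_succ, ih, Finset.sum_range_succ]
    abel

lemma oddRow_even (m : Nat) : oddRow (2 * m) = oddRow m := by
  unfold oddRow
  rw [Finset.sum_range_succ, sum_range_two_mul, Finset.sum_range_succ]
  simp only [gpar_ee, gpar_eo, add_zero]

lemma oddRow_odd (m : Nat) : oddRow (2 * m + 1) = 2 * oddRow m := by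
  unfold oddRow
  have h : 2 * m + 1 + 1 = 2 * (m + 1) := by omega
  rw [h, sum_range_two_mul]
  simp only [gpar_oe, gpar_oo]
  rw [Finset.sum_add_distrib, two_mul]

lemma oddRow_eq_pow (n : Nat) : oddRow n = 2 ^ (pcLoop n 0) := by
  induction n using Nat.strong_induction_on with
  | _ n ih =>
    by_cases h : n = 0
    · subst h; simp [oddRow, gpar, pcLoop]
    · have hlt : n / 2 < n := Nat.div_lt_self (Nat.pos_of_ne_zero h) (by omega)
      rw [pcLoop, if_neg h, pcLoop_shift]
      rcases Nat.even_or_odd n with he | ho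
      · obtain ⟨m, hm⟩ := he
        have hm' : n = 2 * m := by omega
        have h2 : n % 2 = 0 := by omega
        have h3 : n / 2 = m := by omega
        rw [h2, h3, hm', oddRow_even, ← h3, ih _ hlt, h3]
        simp
      · obtain ⟨m, hm⟩ := ho
        have h2 : n % 2 = 1 := by omega
        have h3 : n / 2 = m := by omega
        rw [h2, h3, hm, oddRow_odd, ← h3, ih _ hlt, h3]
        ring

-- symmetry of parity
lemma gpar_symm (N k : Nat) (hk : k ≤ N) : gpar N (N - k) = gpar N k := by
  unfold gpar
  rw [Nat.choose_symm hk]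

-- folding the halved sum back to the full row
lemma half_sum (N : Nat) :
    2 * (∑ k ∈ Finset.range ((N + 1) / 2), gpar N k)
      + (if N % 2 = 0 then gpar N ((N + 1) / 2) else 0) = oddRow N := by
  set h := (N + 1) / 2 with hh
  have hhle : h ≤ N + 1 := by omega
  have split : oddRow N
      = ∑ k ∈ Finset.range h, gpar N k + ∑ k ∈ Finset.Ico h (N + 1), gpar N k := by
    unfold oddRow
    rw [Finset.range_eq_Ico, ← Finset.sum_Ico_consecutive _ (Nat.zero_le h) hhle,
      ← Finset.range_eq_Ico]
  have tail : ∑ k ∈ Finset.Ico h (N + 1), gpar N k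
      = ∑ j ∈ Finset.range (N - h + 1), gpar N j := by
    rw [Finset.sum_Ico_eq_sum_range]
    have hsz : N + 1 - h = N - h + 1 := by omega
    rw [hsz]
    calc ∑ k ∈ Finset.range (N - h + 1), gpar N (h + k)
        = ∑ k ∈ Finset.range (N - h + 1), gpar N (N - h + 1 - 1 - k) := by
          apply Finset.sum_congr rfl
          intro k hk
          rw [Finset.mem_range] at hk
          have h1 : N - h + 1 - 1 - k = N - (h + k) := by omega
          rw [h1, gpar_symm N (h + k) (by omega)]
      _ = ∑ k ∈ Finset.range (N - h + 1), gpar N k := Finset.sum_range_reflect _ _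
  rcases Nat.even_or_odd N with he | ho
  · have h2 : N % 2 = 0 := by rcases he with ⟨m, hm⟩; omega
    have h3 : N - h + 1 = h + 1 := by omega
    rw [split, tail, h3, Finset.sum_range_succ, if_pos h2]
    ring
  · have h2 : N % 2 = 1 := by rcases ho with ⟨m, hm⟩; omega
    have h3 : N - h + 1 = h := by omega
    rw [split, tail, h3, if_neg (by omega)]
    ring

-- A's loop invariant: after j steps the state is (C(N,j), Σ_{k<j} C(N,k) % 2)
lemma loop_inv (N : Nat) (j : Nat) (hj : j ≤ (N + 1) / 2) :
    (List.map (Nat.cast : Nat → Int) (List.range j)).foldl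
      (fun (st : Int × Int) k =>
        (PySem.Int.floordiv (st.1 * ((N : Int) - k)) (k + 1), st.2 + PySem.Int.mod st.1 2))
      (1, 0)
    = ((Nat.choose N j : Int), ((∑ k ∈ Finset.range j, gpar N k : Nat) : Int)) := by
  induction j with
  | zero => simp
  | succ j ih =>
    have hj' : j ≤ (N + 1) / 2 := by omega
    have hjN : j < N := by omega
    rw [List.range_succ, List.map_append, List.foldl_append, ih hj']
    simp only [List.map_cons, List.map_nil, List.foldl_cons, List.foldl_nil]
    rw [Prod.mk.injEq]
    refine ⟨?_, ?_⟩
    · -- binomial step: C(N,j) * (N - j) // (j + 1) = C(N, j+1)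
      have hc : (Nat.choose N j : Int) * ((N : Int) - (j : Int))
          = ((Nat.choose N j * (N - j) : Nat) : Int) := by
        push_cast [Nat.cast_sub (le_of_lt hjN)]
        ring
      have hd : ((j : Int) + 1) = ((j + 1 : Nat) : Int) := by push_cast; ring
      rw [hc, hd, PySem.Int.floordiv_natCast]
      rw [← Nat.choose_succ_right_eq, Nat.mul_div_cancel _ (by omega)]
    · -- partial-sum step
      have hm : PySem.Int.mod ((Nat.choose N j : Nat) : Int) 2
          = ((Nat.choose N j % 2 : Nat) : Int) := by
        exact_mod_cast PySem.Int.mod_natCast (Nat.choose N j) 2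
      rw [hm, Finset.sum_range_succ]
      push_cast [gpar]
      ring

lemma gould_nat (N : Nat) : gould (N : Int) = ((oddRow N : Nat) : Int) := by
  unfold gould
  have hup : PySem.Int.floordiv ((N : Int) + 1) 2 = (((N + 1) / 2 : Nat) : Int) := by
    have : ((N : Int) + 1) = ((N + 1 : Nat) : Int) := by push_cast; ring
    rw [this]
    exact_mod_cast PySem.Int.floordiv_natCast (N + 1) 2
  have hrange : PySem.List.pyRange 0 (((N + 1) / 2 : Nat) : Int)
      = List.map (Nat.cast : Nat → Int) (List.range ((N + 1) / 2)) := by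
    rw [PySem.List.pyRange_one]
    have : ((((N + 1) / 2 : Nat) : Int) - 0).toNat = (N + 1) / 2 := by omega
    rw [this]
    simp
  rw [hup, hrange, loop_inv N ((N + 1) / 2) (le_refl _)]
  have hmodN : PySem.Int.mod (N : Int) 2 = ((N % 2 : Nat) : Int) :=
    PySem.Int.mod_natCast N 2
  have hmodC : PySem.Int.mod ((Nat.choose N ((N + 1) / 2) : Nat) : Int) 2
      = ((Nat.choose N ((N + 1) / 2) % 2 : Nat) : Int) :=
    PySem.Int.mod_natCast _ 2
  simp only [hmodN, hmodC]
  by_cases h2 : N % 2 = 0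
  · rw [if_pos (show ((N % 2 : Nat) : Int) = 0 by exact_mod_cast h2)]
    rw [← half_sum N, if_pos h2]
    push_cast [gpar]
    ring
  · rw [if_neg (show ¬((N % 2 : Nat) : Int) = 0 from fun h => h2 (by exact_mod_cast h))]
    rw [← half_sum N, if_neg h2]
    push_cast
    ring

-- ===== VERDICT (by name: the statement is the Claim_ definition above) =====
theorem gould_spec : Claim_equal_gould := by
  intro n _ hpre
  unfold Spec_gould
  obtain ⟨N, rfl⟩ := Int.eq_ofNat_of_zero_le hpre
  rw [gould_nat]
  unfold gould_alt
  rw [if_neg (by exact_mod_cast Int.not_lt.mpr (Int.natCast_nonneg N))]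
  rw [oddRow_eq_pow]
  push_cast
  norm_num [Int.toNat_natCast]
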